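-- pv_equiv track=rewrite | github.com/yebin113/algorithm | 백준/Gold/1941. 소문난 칠공주/소문난 칠공주.py | is_near
-- ===== SOURCE A (Python) =====
-- from collections import deque
--
-- around = [(-1, 0), (1, 0), (0, -1), (0, 1)]
--
-- def is_near(arr):
--     """
--     is_near : 7명의 조합이 인접하고 있는지 판단하는 함수
--
--     visited는 7개의 인덱스로 방문여부를 판단
--     0번째 인덱스의 i,j 로 시작하여서 델타탐색으로 인접한 자리가 arr에 존재한다면
--     해당 인덱스의 i,j 를 q에 넣고 방문처리한다
--     visited를 모두 돈다면 True, 아니면 인접하지 않은 자리가 있다고 판단하여 False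
--
--     :param arr: 7명 자리 배치도
--     :return: 인접여부 True/ False
--     """
--     visited = [0]*7
--     q = deque()
--     q.append(arr[0])
--     visited[0] = 1
--     while q:
--         i,j = q.popleft()
--         for di, dj in around:
--             ni = i + di
--             nj = j + dj
--             if (ni,nj) in arr:
--                 next_idx = arr.index((ni,nj))
--                 if visited[next_idx]:
--                     continue
--                 q.append((ni,nj))
--                 visited[next_idx] = 1
--     if sum(visited) == 7:
--         return True
--     else:
--         return False
-- ===== SOURCE B (Python) =====
-- def is_near(arr):
--     # Round-based closure: repeatedly expand the component of arr[0] by one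
--     # grid-neighbour layer until it must have stabilised; no queue, no visited
--     # array, no arr.index.
--     cells = set(arr)
--     comp = {arr[0]}
--     for _ in range(len(cells)):
--         comp = comp | ({(i + di, j + dj) for (i, j) in comp
--                         for (di, dj) in ((-1, 0), (1, 0), (0, -1), (0, 1))} & cells)
--     return len(comp) == 7
-- ===== Notes on version B (the rewrite author's own statement) =====
-- stated objective: alternative
-- what changed: Replaces the index-based BFS (deque + 7-slot visited array + repeated 'in arr' and arr.index list scans) by a round-based closure over set(arr): the component of arr[0] is grown by one whole grid-neighbour layer per round until it must have stabilised (len(cells) rounds), then its size is compared with 7 - no queue, no visited array, no arr.index.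
-- outside the precondition, e.g. on is_near([]): A raises IndexError, B raises IndexError
import Mathlib
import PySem

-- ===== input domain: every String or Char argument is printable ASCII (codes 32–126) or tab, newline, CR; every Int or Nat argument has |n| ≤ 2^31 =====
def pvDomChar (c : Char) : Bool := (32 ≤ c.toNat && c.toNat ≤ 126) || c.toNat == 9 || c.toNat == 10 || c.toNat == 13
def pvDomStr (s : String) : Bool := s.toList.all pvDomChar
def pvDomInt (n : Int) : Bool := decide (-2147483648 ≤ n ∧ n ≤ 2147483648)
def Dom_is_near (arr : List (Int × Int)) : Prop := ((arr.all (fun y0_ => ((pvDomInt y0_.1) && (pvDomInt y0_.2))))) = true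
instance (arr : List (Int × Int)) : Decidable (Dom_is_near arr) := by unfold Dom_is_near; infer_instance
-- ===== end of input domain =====

-- B replaces A's index-based BFS (queue + 7-slot visited array + arr.index scans) by a round-based
-- closure over the cell set: it repeatedly adds the whole grid-neighbour layer of the component of
-- arr[0] until it must have stabilised, then compares the component size with 7 (objective: alternative).

-- ===== PORT A =====
def around : List (Int × Int) := [(-1, 0), (1, 0), (0, -1), (0, 1)]

-- one delta of the inner `for di, dj in around` loop; `none` = the Python raised
-- (IndexError on `visited[next_idx]` when next_idx ≥ 7)
def aStep (arr : List (Int × Int)) (i j : Int) (st : Option (List Int × List (Int × Int)))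
    (d : Int × Int) : Option (List Int × List (Int × Int)) :=
  match st with
  | none => none
  | some (visited, q) =>
    let ni := i + d.1
    let nj := j + d.2
    if (ni, nj) ∈ arr then
      match PySem.List.index? arr (ni, nj) with
      | none => none   -- unreachable: membership was just checked
      | some nidx =>
        match PySem.List.pyGet? visited (nidx : Int) with
        | none => none -- IndexError: visited has only 7 entries
        | some w => if w ≠ 0 then some (visited, q)
                    else some (visited.set nidx 1, q ++ [(ni, nj)])
    else some (visited, q)

-- the `while q:` loop; every push flips one of the 7 visited slots from 0 to 1, so on ANY input
-- there are at most 1 + 7 = 8 iterations: fuel 16 is never exhausted (the proof uses the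
-- measure 2 * (number of zeros) + len(q))
def aLoop (arr : List (Int × Int)) : Nat → List Int → List (Int × Int) → Option (List Int)
  | 0, _, _ => none
  | fuel + 1, visited, q =>
    match q with
    | [] => some visited
    | (i, j) :: rest =>
      match around.foldl (aStep arr i j) (some (visited, rest)) with
      | none => none
      | some (v', q') => aLoop arr fuel v' q'

def is_near (arr : List (Int × Int)) : Bool :=
  match PySem.List.pyGet? arr 0 with
  | none => false  -- arr[0] raised IndexError (arr = []); excluded by Pre_
  | some c0 =>
    let visited := (List.replicate 7 (0 : Int)).set 0 1   -- visited = [0]*7; visited[0] = 1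
    match aLoop arr 16 visited [c0] with
    | none => false  -- the loop raised IndexError; excluded by Pre_
    | some v => if v.sum = 7 then true else false

-- ===== PORT B =====
-- comp | ({(i+di, j+dj) for (i,j) in comp for (di,dj) in ((-1,0),(1,0),(0,-1),(0,1))} & cells)
def bExpand (cells : PySem.Set (Int × Int)) (comp : PySem.Set (Int × Int)) :
    PySem.Set (Int × Int) :=
  PySem.Set.union comp
    (PySem.Set.inter
      (PySem.Set.ofList (comp.flatMap (fun c =>
        ([(-1, 0), (1, 0), (0, -1), (0, 1)] : List (Int × Int)).map
          (fun d => (c.1 + d.1, c.2 + d.2)))))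
      cells)

def is_near_alt (arr : List (Int × Int)) : Bool :=
  match PySem.List.pyGet? arr 0 with
  | none => false  -- arr[0] raised IndexError (arr = []); excluded by Pre_
  | some c0 =>
    let cells : PySem.Set (Int × Int) := PySem.Set.ofList arr
    let comp := (PySem.List.pyRange 0 (cells.length : Int) 1).foldl
      (fun comp _ => bExpand cells comp) (PySem.Set.ofList [c0])
    decide (comp.length = 7)

-- ===== PRECONDITION & SPEC =====
-- Pre_ excludes the empty list (arr[0] raises IndexError) and lists longer than the fixed
-- 7-slot visited array unless their first cell has no grid neighbour in the list: past 7 cells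
-- A's BFS can reach a cell whose first index is ≥ 7 and raise IndexError on visited[next_idx]
-- (the raising set is not closed-form); on the excluded long inputs where A does return,
-- it returns the same value as B (see cites).
def Pre_is_near (arr : List (Int × Int)) : Prop :=
  arr ≠ [] ∧
    (arr.length ≤ 7 ∨
      ∀ d ∈ ([(-1, 0), (1, 0), (0, -1), (0, 1)] : List (Int × Int)),
        ((arr.getD 0 (0, 0)).1 + d.1, (arr.getD 0 (0, 0)).2 + d.2) ∉ arr)
instance (arr : List (Int × Int)) : Decidable (Pre_is_near arr) := by
  unfold Pre_is_near; infer_instance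

def pvWitness_is_near : (List (Int × Int)) :=
  [(0, 0), (0, 1), (1, 1), (1, 0), (2, 0), (2, 1), (3, 1)]

def Spec_is_near (arr : List (Int × Int)) (out : Bool) : Prop := out = is_near_alt arr
instance (arr : List (Int × Int)) (out : Bool) : Decidable (Spec_is_near arr out) := by
  unfold Spec_is_near; infer_instance

-- ===== CLAIM (what is proved, stated in full; the proofs are below) =====
def Claim_equal_is_near : Prop :=
  ∀ (arr : List (Int × Int)), Dom_is_near arr → Pre_is_near arr → Spec_is_near arr (is_near arr)

-- ===== LEMMAS AND PROOFS =====

-- grid adjacency used by both programs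
def adjc (c c' : Int × Int) : Prop := ∃ d ∈ around, c' = (c.1 + d.1, c.2 + d.2)

-- cells reachable from s through grid-adjacent members of arr (the common mathematical object)
inductive Reach (arr : List (Int × Int)) (s : Int × Int) : (Int × Int) → Prop
  | base : Reach arr s s
  | step {c c'} : Reach arr s c → adjc c c' → c' ∈ arr → Reach arr s c'

-- ---- B side: the iterated expansion computes exactly the reachable cells ----

theorem mem_bExpand (cells comp : PySem.Set (Int × Int)) (x : Int × Int) :
    x ∈ bExpand cells comp ↔ x ∈ comp ∨ ((∃ c ∈ comp, adjc c x) ∧ x ∈ cells) := by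
  unfold bExpand adjc
  rw [PySem.Set.mem_union, PySem.Set.mem_inter, PySem.Set.mem_ofList, List.mem_flatMap]
  simp only [List.mem_map, around]
  constructor
  · rintro (h | ⟨⟨c, hc, d, hd, rfl⟩, hcell⟩)
    · exact Or.inl h
    · exact Or.inr ⟨⟨c, hc, d, hd, rfl⟩, hcell⟩
  · rintro (h | ⟨⟨c, hc, d, hd, rfl⟩, hcell⟩)
    · exact Or.inl h
    · exact Or.inr ⟨⟨c, hc, d, hd, rfl⟩, hcell⟩

theorem bExpand_decomp (cells comp : PySem.Set (Int × Int)) :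
    ∃ ex, bExpand cells comp = comp ++ ex := by
  unfold bExpand
  exact ⟨_, PySem.Set.update_eq_append_filter comp _⟩

theorem foldl_ignore_iterate {α β : Type} (f : α → α) (l : List β) (s : α) :
    l.foldl (fun a _ => f a) s = f^[l.length] s := by
  induction l generalizing s with
  | nil => rfl
  | cons b t ih => simp [List.foldl_cons, ih, Function.iterate_succ_apply]

theorem B_inv (arr : List (Int × Int)) (c0 : Int × Int) (hmem0 : c0 ∈ arr) :
    ∀ k, ((bExpand (PySem.Set.ofList arr))^[k] [c0]).Nodup ∧
      (∀ x ∈ (bExpand (PySem.Set.ofList arr))^[k] [c0], x ∈ arr ∧ Reach arr c0 x) ∧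
      c0 ∈ (bExpand (PySem.Set.ofList arr))^[k] [c0] := by
  intro k
  induction k with
  | zero =>
    refine ⟨List.nodup_singleton c0, ?_, List.mem_singleton_self c0⟩
    intro x hx; rw [Function.iterate_zero_apply, List.mem_singleton] at hx
    subst hx; exact ⟨hmem0, Reach.base⟩
  | succ k ih =>
    obtain ⟨hnd, hsub, hc0⟩ := ih
    rw [Function.iterate_succ_apply']
    refine ⟨PySem.Set.nodup_union _ _ hnd, ?_, ?_⟩
    · intro x hx
      rw [mem_bExpand] at hx
      rcases hx with hx | ⟨⟨c, hc, hadj⟩, hcell⟩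
      · exact hsub x hx
      · have hxarr : x ∈ arr := (PySem.Set.mem_ofList arr x).mp hcell
        exact ⟨hxarr, Reach.step (hsub c hc).2 hadj hxarr⟩
    · rcases bExpand_decomp (PySem.Set.ofList arr) ((bExpand (PySem.Set.ofList arr))^[k] [c0]) with ⟨ex, hex⟩
      rw [hex]; exact List.mem_append_left _ hc0

theorem B_pigeon (arr : List (Int × Int)) (c0 : Int × Int) :
    ∀ k, bExpand (PySem.Set.ofList arr) ((bExpand (PySem.Set.ofList arr))^[k] [c0])
        = (bExpand (PySem.Set.ofList arr))^[k] [c0] ∨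
      k + 1 ≤ ((bExpand (PySem.Set.ofList arr))^[k] [c0]).length := by
  intro k
  induction k with
  | zero => right; simp
  | succ k ih =>
    rcases ih with hfix | hlen
    · left; rw [Function.iterate_succ_apply', hfix, hfix]
    · rcases bExpand_decomp (PySem.Set.ofList arr) ((bExpand (PySem.Set.ofList arr))^[k] [c0]) with ⟨ex, hex⟩
      cases ex with
      | nil =>
        left
        rw [Function.iterate_succ_apply']
        rw [List.append_nil] at hex
        rw [hex, hex]
      | cons e t =>
        right
        rw [Function.iterate_succ_apply', hex, List.length_append]
        simp only [List.length_cons]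
        omega

theorem B_char (arr : List (Int × Int)) (c0 : Int × Int)
    (h0 : PySem.List.pyGet? arr 0 = some c0) :
    ∃ L : List (Int × Int), L.Nodup ∧ (∀ x, x ∈ L ↔ Reach arr c0 x) ∧
      is_near_alt arr = decide (L.length = 7) := by
  have h0' : arr[0]? = some c0 := by rw [← PySem.List.pyGet?_zero]; exact h0
  have hmem0 : c0 ∈ arr := List.mem_of_getElem? h0'
  have bound : ∀ k, ((bExpand (PySem.Set.ofList arr))^[k] [c0]).length
      ≤ (PySem.Set.ofList arr).length := by
    intro k
    obtain ⟨hnd, hsub, _⟩ := B_inv arr c0 hmem0 k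
    have hsubl : (bExpand (PySem.Set.ofList arr))^[k] [c0] ⊆ PySem.Set.ofList arr := by
      intro x hx; exact (PySem.Set.mem_ofList arr x).mpr (hsub x hx).1
    exact (List.subperm_of_subset hnd hsubl).length_le
  have hclose : bExpand (PySem.Set.ofList arr)
        ((bExpand (PySem.Set.ofList arr))^[(PySem.Set.ofList arr).length] [c0])
      = (bExpand (PySem.Set.ofList arr))^[(PySem.Set.ofList arr).length] [c0] := by
    rcases B_pigeon arr c0 (PySem.Set.ofList arr).length with h | h
    · exact h
    · exact absurd (le_trans h (bound (PySem.Set.ofList arr).length)) (by omega)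
  have hcomplete : ∀ x, Reach arr c0 x →
      x ∈ (bExpand (PySem.Set.ofList arr))^[(PySem.Set.ofList arr).length] [c0] := by
    intro x hx
    induction hx with
    | base => exact (B_inv arr c0 hmem0 _).2.2
    | step hR hadj hmem ih =>
      rw [← hclose, mem_bExpand]
      exact Or.inr ⟨⟨_, ih, hadj⟩, (PySem.Set.mem_ofList arr _).mpr hmem⟩
  refine ⟨(bExpand (PySem.Set.ofList arr))^[(PySem.Set.ofList arr).length] [c0],
    (B_inv arr c0 hmem0 _).1, ?_, ?_⟩
  · intro x
    exact ⟨fun hx => ((B_inv arr c0 hmem0 _).2.1 x hx).2, hcomplete x⟩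
  · simp only [is_near_alt, h0]
    rw [foldl_ignore_iterate (bExpand (PySem.Set.ofList arr))]
    have hn : (PySem.List.pyRange 0 ((PySem.Set.ofList arr).length : Int) 1).length
        = (PySem.Set.ofList arr).length := by
      rw [PySem.List.length_pyRange_one]; simp
    rw [hn, PySem.Set.ofList_eq_self_of_nodup [c0] (List.nodup_singleton c0)]

-- ---- A side: the BFS marks exactly the first indices of the reachable cells ----

-- "cell c is marked visited": some slot k holds 1 and arr[k] = c
def Vis (arr : List (Int × Int)) (v : List Int) (c : Int × Int) : Prop :=
  ∃ k : Nat, v[k]? = some 1 ∧ arr[k]? = some c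

structure ACore (arr : List (Int × Int)) (c0 : Int × Int) (v : List Int)
    (q : List (Int × Int)) : Prop where
  len7 : v.length = 7
  bits : ∀ x ∈ v, x = 0 ∨ x = 1
  first : ∀ k : Nat, v[k]? = some 1 → ∃ c, arr[k]? = some c ∧ PySem.List.index? arr c = some k
  start : v[0]? = some 1
  sound : ∀ c, Vis arr v c → Reach arr c0 c
  qsub : ∀ c ∈ q, Vis arr v c

-- every visited cell is still pending in q or already has all its arr-neighbours visited
def Front (arr : List (Int × Int)) (v : List Int) (q : List (Int × Int)) : Prop :=
  ∀ c, Vis arr v c → c ∈ q ∨ (∀ c', adjc c c' → c' ∈ arr → Vis arr v c')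

def zeros (v : List Int) : Nat := v.countP (fun x => decide (x = 0))

theorem zeros_set (v : List Int) (n : Nat) (h : v[n]? = some 0) :
    zeros (v.set n 1) + 1 = zeros v := by
  have hn : n < v.length := by
    by_contra hc
    rw [List.getElem?_eq_none (by omega)] at h
    simp at h
  have hv0 : v[n] = 0 := by
    have := List.getElem?_eq_getElem hn
    rw [h] at this; exact (Option.some.injEq _ _).mp this.symm
  have hrepr : v = v.take n ++ (0 : Int) :: v.drop (n + 1) := by
    conv_lhs => rw [← List.set_getElem_self (as := v) (i := n) (h := hn)]
    rw [hv0, List.set_eq_take_cons_drop _ hn]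
  rw [List.set_eq_take_cons_drop _ hn]
  conv_rhs => rw [hrepr]
  unfold zeros
  simp [List.countP_append]
  omega

theorem Vis_mono {arr : List (Int × Int)} {v v' : List Int} {c : Int × Int}
    (h : ∀ k : Nat, v[k]? = some 1 → v'[k]? = some 1) : Vis arr v c → Vis arr v' c := by
  rintro ⟨k, h1, h2⟩; exact ⟨k, h k h1, h2⟩

theorem aStep_correct {arr : List (Int × Int)} {c0 : Int × Int} {v : List Int}
    {q : List (Int × Int)} {i j : Int} {d : Int × Int}
    (hlen : arr.length ≤ 7) (hd : d ∈ around) (hr : Reach arr c0 (i, j))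
    (hC : ACore arr c0 v q) :
    ∃ v' q', aStep arr i j (some (v, q)) d = some (v', q') ∧
      ACore arr c0 v' q' ∧
      (∀ k : Nat, v[k]? = some 1 → v'[k]? = some 1) ∧
      (∃ t, q' = q ++ t) ∧
      2 * zeros v' + q'.length ≤ 2 * zeros v + q.length ∧
      (∀ k : Nat, v'[k]? = some 1 → v[k]? = some 1 ∨ ∃ c, arr[k]? = some c ∧ c ∈ q') ∧
      ((i + d.1, j + d.2) ∈ arr → Vis arr v' (i + d.1, j + d.2)) := by
  by_cases hmem : (i + d.1, j + d.2) ∈ arr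
  · obtain ⟨nidx, hidx⟩ : ∃ n, PySem.List.index? arr (i + d.1, j + d.2) = some n := by
      rw [← Option.isSome_iff_exists, PySem.List.index?_isSome_iff]; exact hmem
    obtain ⟨hk, harrk, -⟩ := PySem.List.getElem_of_index?_eq_some hidx
    have hkv : nidx < v.length := by rw [hC.len7]; omega
    have hget : PySem.List.pyGet? v (nidx : Int) = some v[nidx] := by
      rw [PySem.List.pyGet?_natCast]; exact List.getElem?_eq_getElem hkv
    have harrk? : arr[nidx]? = some (i + d.1, j + d.2) := by
      rw [List.getElem?_eq_getElem hk, harrk]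
    rcases hC.bits v[nidx] (List.getElem_mem hkv) with h0 | h1
    · -- fresh cell: mark and push
      refine ⟨v.set nidx 1, q ++ [(i + d.1, j + d.2)], ?_, ?_, ?_, ⟨_, rfl⟩, ?_, ?_, ?_⟩
      · simp only [aStep, hidx, hget, if_pos hmem, h0]
        simp
      · have hset1 : (v.set nidx 1)[nidx]? = some 1 := List.getElem?_set_self hkv
        have hsetne : ∀ k : Nat, k ≠ nidx → (v.set nidx 1)[k]? = v[k]? := by
          intro k hne; exact List.getElem?_set_ne (Ne.symm hne)
        have hmono : ∀ k : Nat, v[k]? = some 1 → (v.set nidx 1)[k]? = some 1 := by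
          intro k h1
          by_cases hkn : k = nidx
          · subst hkn; exact hset1
          · rw [hsetne k hkn]; exact h1
        have hVnew : Vis arr (v.set nidx 1) (i + d.1, j + d.2) := ⟨nidx, hset1, harrk?⟩
        refine ⟨?_, ?_, ?_, ?_, ?_, ?_⟩
        · rw [List.length_set]; exact hC.len7
        · intro x hx
          rcases List.mem_or_eq_of_mem_set hx with hx | hx
          · exact hC.bits x hx
          · right; exact hx
        · intro k hk1
          by_cases hkn : k = nidx
          · subst hkn; exact ⟨(i + d.1, j + d.2), harrk?, hidx⟩
          · rw [hsetne k hkn] at hk1; exact hC.first k hk1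
        · exact hmono 0 hC.start
        · intro c hVc
          rcases hVc with ⟨k, hk1, hk2⟩
          by_cases hkn : k = nidx
          · subst hkn
            rw [harrk?] at hk2
            cases hk2
            exact Reach.step hr ⟨d, hd, rfl⟩ hmem
          · rw [hsetne k hkn] at hk1
            exact hC.sound c ⟨k, hk1, hk2⟩
        · intro c hc
          rcases List.mem_append.mp hc with hc | hc
          · exact Vis_mono hmono (hC.qsub c hc)
          · rw [List.mem_singleton] at hc; subst hc; exact hVnew
      · intro k h1
        by_cases hkn : k = nidx
        · subst hkn
          rw [List.getElem?_eq_getElem hkv, h0] at h1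
          simp at h1
        · rw [List.getElem?_set_ne (Ne.symm hkn)]; exact h1
      · have hz : zeros (v.set nidx 1) + 1 = zeros v := by
          apply zeros_set
          rw [List.getElem?_eq_getElem hkv, h0]
        rw [List.length_append]
        simp only [List.length_singleton]
        omega
      · intro k h1
        by_cases hkn : k = nidx
        · subst hkn
          exact Or.inr ⟨(i + d.1, j + d.2), harrk?, List.mem_append_right _ (List.mem_singleton_self _)⟩
        · rw [List.getElem?_set_ne (Ne.symm hkn)] at h1; exact Or.inl h1
      · intro _
        exact ⟨nidx, List.getElem?_set_self hkv, harrk?⟩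
    · -- already visited: nothing changes
      refine ⟨v, q, ?_, hC, fun k h => h, ⟨[], (List.append_nil q).symm⟩, le_refl _, fun k h => Or.inl h, ?_⟩
      · simp only [aStep, hidx, hget, if_pos hmem, h1]
        simp
      · intro _
        refine ⟨nidx, ?_, harrk?⟩
        rw [List.getElem?_eq_getElem hkv, h1]
  · refine ⟨v, q, ?_, hC, fun k h => h, ⟨[], (List.append_nil q).symm⟩, le_refl _, fun k h => Or.inl h, fun h => absurd h hmem⟩
    simp only [aStep, if_neg hmem]

theorem aFold_correct {arr : List (Int × Int)} {c0 : Int × Int} {v : List Int}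
    {q : List (Int × Int)} {i j : Int}
    (hlen : arr.length ≤ 7) (hr : Reach arr c0 (i, j))
    (hC : ACore arr c0 v q) :
    ∃ v' q', around.foldl (aStep arr i j) (some (v, q)) = some (v', q') ∧
      ACore arr c0 v' q' ∧
      (∀ k : Nat, v[k]? = some 1 → v'[k]? = some 1) ∧
      (∃ t, q' = q ++ t) ∧
      2 * zeros v' + q'.length ≤ 2 * zeros v + q.length ∧
      (∀ k : Nat, v'[k]? = some 1 → v[k]? = some 1 ∨ ∃ c, arr[k]? = some c ∧ c ∈ q') ∧
      (∀ c', adjc (i, j) c' → c' ∈ arr → Vis arr v' c') := by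
  obtain ⟨v1, q1, e1, hC1, m1, ⟨t1, ht1⟩, me1, n1, g1⟩ :=
    aStep_correct (d := ((-1 : Int), (0 : Int))) hlen (by simp [around]) hr hC
  obtain ⟨v2, q2, e2, hC2, m2, ⟨t2, ht2⟩, me2, n2, g2⟩ :=
    aStep_correct (d := ((1 : Int), (0 : Int))) hlen (by simp [around]) hr hC1
  obtain ⟨v3, q3, e3, hC3, m3, ⟨t3, ht3⟩, me3, n3, g3⟩ :=
    aStep_correct (d := ((0 : Int), (-1 : Int))) hlen (by simp [around]) hr hC2
  obtain ⟨v4, q4, e4, hC4, m4, ⟨t4, ht4⟩, me4, n4, g4⟩ :=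
    aStep_correct (d := ((0 : Int), (1 : Int))) hlen (by simp [around]) hr hC3
  have hq14 : ∀ c, c ∈ q1 → c ∈ q4 := by
    intro c hc
    rw [ht4, ht3, ht2]
    exact List.mem_append_left _ (List.mem_append_left _ (List.mem_append_left _ hc))
  have hq24 : ∀ c, c ∈ q2 → c ∈ q4 := by
    intro c hc
    rw [ht4, ht3]
    exact List.mem_append_left _ (List.mem_append_left _ hc)
  have hq34 : ∀ c, c ∈ q3 → c ∈ q4 := by
    intro c hc
    rw [ht4]
    exact List.mem_append_left _ hc
  refine ⟨v4, q4, ?_, hC4, ?_, ?_, ?_, ?_, ?_⟩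
  · simp only [around, List.foldl_cons, List.foldl_nil, e1, e2, e3, e4]
  · intro k h; exact m4 k (m3 k (m2 k (m1 k h)))
  · exact ⟨t1 ++ (t2 ++ (t3 ++ t4)), by rw [ht4, ht3, ht2, ht1]; simp [List.append_assoc]⟩
  · exact le_trans me4 (le_trans me3 (le_trans me2 me1))
  · intro k h
    rcases n4 k h with h | ⟨c, hc1, hc2⟩
    · rcases n3 k h with h | ⟨c, hc1, hc2⟩
      · rcases n2 k h with h | ⟨c, hc1, hc2⟩
        · rcases n1 k h with h | ⟨c, hc1, hc2⟩
          · exact Or.inl h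
          · exact Or.inr ⟨c, hc1, hq14 c hc2⟩
        · exact Or.inr ⟨c, hc1, hq24 c hc2⟩
      · exact Or.inr ⟨c, hc1, hq34 c hc2⟩
    · exact Or.inr ⟨c, hc1, hc2⟩
  · rintro c' ⟨d, hd, rfl⟩ hmem
    simp only [around, List.mem_cons, List.not_mem_nil, or_false] at hd
    rcases hd with rfl | rfl | rfl | rfl
    · exact Vis_mono (fun k h => m4 k (m3 k (m2 k h))) (g1 hmem)
    · exact Vis_mono (fun k h => m4 k (m3 k h)) (g2 hmem)
    · exact Vis_mono (fun k h => m4 k h) (g3 hmem)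
    · exact g4 hmem

theorem aLoop_correct {arr : List (Int × Int)} {c0 : Int × Int} (hlen : arr.length ≤ 7) :
    ∀ fuel (v : List Int) (q : List (Int × Int)),
      ACore arr c0 v q → Front arr v q → 2 * zeros v + q.length < fuel →
      ∃ v', aLoop arr fuel v q = some v' ∧ ACore arr c0 v' [] ∧ Front arr v' [] := by
  intro fuel
  induction fuel with
  | zero => intro v q _ _ h; omega
  | succ fuel ih =>
    intro v q hC hF hM
    cases q with
    | nil => exact ⟨v, rfl, hC, hF⟩
    | cons c rest =>
      obtain ⟨i, j⟩ := c
      have hVc : Vis arr v (i, j) := hC.qsub _ (List.mem_cons_self)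
      have hr : Reach arr c0 (i, j) := hC.sound _ hVc
      have hCrest : ACore arr c0 v rest :=
        ⟨hC.len7, hC.bits, hC.first, hC.start, hC.sound,
         fun c hc => hC.qsub c (List.mem_cons_of_mem _ hc)⟩
      obtain ⟨v', q', e, hC', m, ⟨t, ht⟩, me, n, g⟩ := aFold_correct hlen hr hCrest
      have hFront' : Front arr v' q' := by
        intro c'' hVc''
        rcases hVc'' with ⟨k, hk1, hk2⟩
        rcases n k hk1 with hold | ⟨c, hc1, hc2⟩
        · have hVold : Vis arr v c'' := ⟨k, hold, hk2⟩
          rcases hF c'' hVold with hin | hclosed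
          · rcases List.mem_cons.mp hin with rfl | hin
            · exact Or.inr (fun c' hadj hmem => g c' hadj hmem)
            · left; rw [ht]; exact List.mem_append_left _ hin
          · exact Or.inr (fun c' hadj hmem => Vis_mono m (hclosed c' hadj hmem))
        · left
          rw [hc1] at hk2
          cases hk2
          exact hc2
      have hM' : 2 * zeros v' + q'.length < fuel := by
        simp only [List.length_cons] at hM
        omega
      obtain ⟨vf, ef, hCf, hFf⟩ := ih v' q' hC' hFront' hM'
      refine ⟨vf, ?_, hCf, hFf⟩
      simp only [aLoop, e]
      exact ef

theorem sum_bits (v : List Int) (hb : ∀ x ∈ v, x = 0 ∨ x = 1) :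
    v.sum = (v.countP (fun x => decide (x = 1)) : Int) := by
  induction v with
  | nil => rfl
  | cons x t ih =>
    have hx := hb x List.mem_cons_self
    have ht := fun y hy => hb y (List.mem_cons_of_mem _ hy)
    rcases hx with rfl | rfl
    · simp [ih ht]
    · simp [ih ht]; omega

theorem countP_fst_zipIdx : ∀ (v : List Int) (n : Nat),
    ((v.zipIdx n).countP (fun p => decide (p.1 = 1))) = v.countP (fun x => decide (x = 1)) := by
  intro v
  induction v with
  | nil => intro n; rfl
  | cons x t ih => intro n; simp [List.zipIdx_cons, List.countP_cons, ih]

theorem nodup_zipIdx (v : List Int) : (v.zipIdx).Nodup := by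
  apply List.Nodup.of_map Prod.snd
  rw [List.zipIdx_map_snd]
  exact List.nodup_range'

theorem A_char (arr : List (Int × Int)) (c0 : Int × Int)
    (h0 : PySem.List.pyGet? arr 0 = some c0) (hlen : arr.length ≤ 7) :
    ∃ L : List (Int × Int), L.Nodup ∧ (∀ x, x ∈ L ↔ Reach arr c0 x) ∧
      is_near arr = decide (L.length = 7) := by
  have h0' : arr[0]? = some c0 := by rw [← PySem.List.pyGet?_zero]; exact h0
  have hidx0 : PySem.List.index? arr c0 = some 0 := by
    cases arr with
    | nil => simp at h0'
    | cons a t =>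
      simp only [List.getElem?_cons_zero, Option.some.injEq] at h0'
      subst h0'
      exact PySem.List.index?_cons_self a t
  have hv0first : ∀ k : Nat, ((List.replicate 7 (0 : Int)).set 0 1)[k]? = some 1 → k = 0 := by
    intro k hk
    cases k with
    | zero => rfl
    | succ m =>
      rw [show (List.replicate 7 (0 : Int)).set 0 1 = 1 :: List.replicate 6 0 from rfl] at hk
      rw [List.getElem?_cons_succ, List.getElem?_replicate] at hk
      split at hk <;> simp at hk
  have hstart0 : ((List.replicate 7 (0 : Int)).set 0 1)[0]? = some 1 := rfl
  have hC0 : ACore arr c0 ((List.replicate 7 (0 : Int)).set 0 1) [c0] := by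
    refine ⟨rfl, by decide, ?_, hstart0, ?_, ?_⟩
    · intro k hk
      have := hv0first k hk
      subst this
      exact ⟨c0, h0', hidx0⟩
    · rintro c ⟨k, hk1, hk2⟩
      have := hv0first k hk1
      subst this
      rw [h0'] at hk2
      cases hk2
      exact Reach.base
    · intro c hc
      rw [List.mem_singleton] at hc
      subst hc
      exact ⟨0, hstart0, h0'⟩
  have hF0 : Front arr ((List.replicate 7 (0 : Int)).set 0 1) [c0] := by
    rintro c ⟨k, hk1, hk2⟩
    have := hv0first k hk1
    subst this
    rw [h0'] at hk2
    cases hk2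
    exact Or.inl (List.mem_singleton_self c0)
  have hz6 : zeros ((List.replicate 7 (0 : Int)).set 0 1) = 6 := by decide
  have hM0 : 2 * zeros ((List.replicate 7 (0 : Int)).set 0 1) + ([c0] : List (Int × Int)).length < 16 := by
    rw [hz6]; simp
  obtain ⟨v', e, hC', hF'⟩ := aLoop_correct hlen 16 _ _ hC0 hF0 hM0
  refine ⟨((v'.zipIdx).filter (fun p => decide (p.1 = 1))).map (fun p => arr.getD p.2 (0, 0)),
    ?_, ?_, ?_⟩
  · apply List.Nodup.map_on
    · rintro ⟨x, k⟩ hp ⟨x', k'⟩ hp' heq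
      obtain ⟨hpz, hpf⟩ := List.mem_filter.mp hp
      obtain ⟨hpz', hpf'⟩ := List.mem_filter.mp hp'
      simp only [decide_eq_true_eq] at hpf hpf'
      subst hpf; subst hpf'
      have hv : v'[k]? = some 1 := List.mk_mem_zipIdx_iff_getElem?.mp hpz
      have hv' : v'[k']? = some 1 := List.mk_mem_zipIdx_iff_getElem?.mp hpz'
      obtain ⟨c, hc1, hc2⟩ := hC'.first k hv
      obtain ⟨c', hc1', hc2'⟩ := hC'.first k' hv'
      have hg : arr.getD k (0, 0) = c := by rw [List.getD_eq_getElem?_getD, hc1]; rfl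
      have hg' : arr.getD k' (0, 0) = c' := by rw [List.getD_eq_getElem?_getD, hc1']; rfl
      simp only at heq
      rw [hg, hg'] at heq
      subst heq
      rw [hc2] at hc2'
      cases hc2'
      rfl
    · exact (nodup_zipIdx v').filter _
  · intro x
    constructor
    · intro hx
      obtain ⟨⟨y, k⟩, hp, hfx⟩ := List.mem_map.mp hx
      obtain ⟨hpz, hpf⟩ := List.mem_filter.mp hp
      simp only [decide_eq_true_eq] at hpf
      subst hpf
      have hv : v'[k]? = some 1 := List.mk_mem_zipIdx_iff_getElem?.mp hpz
      obtain ⟨c, hc1, hc2⟩ := hC'.first k hv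
      have hg : arr.getD k (0, 0) = c := by rw [List.getD_eq_getElem?_getD, hc1]; rfl
      simp only at hfx
      rw [hg] at hfx
      subst hfx
      exact hC'.sound c ⟨k, hv, hc1⟩
    · intro hx
      have hyVis : ∀ z, Reach arr c0 z → Vis arr v' z := by
        intro z hz
        induction hz with
        | base => exact ⟨0, hC'.start, h0'⟩
        | step hR hadj hmem ih =>
          rcases hF' _ ih with hin | hcl
          · simp at hin
          · exact hcl _ hadj hmem
      obtain ⟨k, hk1, hk2⟩ := hyVis x hx
      apply List.mem_map.mpr
      refine ⟨((1 : Int), k),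
        List.mem_filter.mpr ⟨List.mk_mem_zipIdx_iff_getElem?.mpr hk1, by simp⟩, ?_⟩
      simp only
      rw [List.getD_eq_getElem?_getD, hk2]; rfl
  · have hlenL : (((v'.zipIdx).filter (fun p => decide (p.1 = 1))).map
        (fun p => arr.getD p.2 (0, 0))).length = v'.countP (fun x => decide (x = 1)) := by
      rw [List.length_map, ← List.countP_eq_length_filter, countP_fst_zipIdx]
    have hsum := sum_bits v' hC'.bits
    simp only [is_near, h0]
    rw [e]
    change (if v'.sum = 7 then true else false) = _
    rw [hsum, hlenL]
    by_cases h : v'.countP (fun x => decide (x = 1)) = 7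
    · simp [h]
    · rw [if_neg (by exact_mod_cast h)]
      simp [h]

-- ---- the long-input case admitted by Pre_: the first cell has no neighbour in arr ----

theorem reach_isolated (arr : List (Int × Int)) (c0 : Int × Int)
    (hiso : ∀ d ∈ around, (c0.1 + d.1, c0.2 + d.2) ∉ arr) :
    ∀ x, Reach arr c0 x → x = c0 := by
  intro x hx
  induction hx with
  | base => rfl
  | step hR hadj hmem ih =>
    subst ih
    rcases hadj with ⟨d, hd, rfl⟩
    exact absurd hmem (hiso d hd)

theorem isolated_A (arr : List (Int × Int)) (c0 : Int × Int)
    (h0 : PySem.List.pyGet? arr 0 = some c0)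
    (hiso : ∀ d ∈ around, (c0.1 + d.1, c0.2 + d.2) ∉ arr) :
    is_near arr = false := by
  obtain ⟨i, j⟩ := c0
  have h1 := hiso (-1, 0) (by simp [around])
  have h2 := hiso (1, 0) (by simp [around])
  have h3 := hiso (0, -1) (by simp [around])
  have h4 := hiso (0, 1) (by simp [around])
  simp only at h1 h2 h3 h4
  have hfold : around.foldl (aStep arr i j) (some ((List.replicate 7 (0 : Int)).set 0 1, [])) =
      some ((List.replicate 7 (0 : Int)).set 0 1, []) := by
    simp only [around, List.foldl_cons, List.foldl_nil]
    simp only [aStep, if_neg h1, if_neg h2, if_neg h3, if_neg h4]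
  simp only [is_near, h0]
  rw [show (16 : Nat) = 15 + 1 from rfl]
  simp only [aLoop, hfold]
  rfl

-- ===== VERDICT (by name: the statement is the Claim_ definition above) =====
theorem is_near_spec : Claim_equal_is_near := by
  unfold Claim_equal_is_near
  intro arr _ hpre
  unfold Spec_is_near
  obtain ⟨hne, hrest⟩ := hpre
  obtain ⟨c0, h0⟩ : ∃ c0, PySem.List.pyGet? arr 0 = some c0 := by
    cases arr with
    | nil => exact absurd rfl hne
    | cons a t => exact ⟨a, by rw [PySem.List.pyGet?_zero]; rfl⟩
  rcases hrest with hlen | hiso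
  · obtain ⟨LA, hndA, hmemA, hA⟩ := A_char arr c0 h0 hlen
    obtain ⟨LB, hndB, hmemB, hB⟩ := B_char arr c0 h0
    have hperm : LA.Perm LB :=
      (List.perm_ext_iff_of_nodup hndA hndB).mpr (fun x => by rw [hmemA, hmemB])
    rw [hA, hB, hperm.length_eq]
  · have hgd : arr.getD 0 (0, 0) = c0 := by
      rw [List.getD_eq_getElem?_getD, ← PySem.List.pyGet?_zero, h0]; rfl
    have hiso' : ∀ d ∈ around, (c0.1 + d.1, c0.2 + d.2) ∉ arr := by
      intro d hd
      have := hiso d (by simpa [around] using hd)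
      rwa [hgd] at this
    rw [isolated_A arr c0 h0 hiso']
    obtain ⟨LB, hndB, hmemB, hB⟩ := B_char arr c0 h0
    have hperm : LB.Perm [c0] :=
      (List.perm_ext_iff_of_nodup hndB (List.nodup_singleton c0)).mpr (by
        intro x
        rw [hmemB, List.mem_singleton]
        exact ⟨fun h => reach_isolated arr c0 hiso' x h, fun h => h ▸ Reach.base⟩)
    rw [hB, hperm.length_eq]
    simp
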